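-- pv_equiv track=rewrite | github.com/cloud-continuum-research-center/CCRC_PACC_Platform | PACC Framework/PACC-Backend/source/services.py | make_bin_dep_list
-- ===== SOURCE A (Python) =====
-- def make_bin_dep_list(node_list: list) -> tuple[list]:
--     parent_lists = list() # element type => str
--     children_lists = list() # element type => list
--
--     for i in range(len(node_list)):
--         # Add parent
--         if i == 0:
--             parent_lists.append(None)
--         else:
--             parent_lists.append(node_list[(i - 1) // 2])
--
--         # Add child
--         children_list = list()
--
--         first_child_idx = i * 2 + 1
--         second_child_idx = i * 2 + 2
--
--         if first_child_idx < len(node_list):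
--             children_list.append(node_list[first_child_idx])
--         if second_child_idx < len(node_list):
--             children_list.append(node_list[second_child_idx])
--
--         children_lists.append(children_list)
--
--
--     return (parent_lists, children_lists)
-- ===== SOURCE B (Python) =====
-- def make_bin_dep_list(node_list: list) -> tuple[list]:
--     n = len(node_list)
--     # Parent sequence of indices 1..n-1 is each node repeated twice, in order.
--     doubled = [x for v in node_list for x in (v, v)]
--     parent_lists = ([None] + doubled)[:n]
--     # Children of node p are the slice node_list[2p+1:2p+3]: chunk the tail into
--     # pairs, then pad with empty lists up to n.
--     tail = node_list[1:]
--     children_lists = [tail[k:k + 2] for k in range(0, len(tail), 2)]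
--     children_lists += [[] for _ in range(n - len(children_lists))]
--     return (parent_lists, children_lists)
-- ===== Notes on version B (the rewrite author's own statement) =====
-- stated objective: alternative
-- what changed: B replaces A's per-node index arithmetic ((i-1)//2, 2i+1, 2i+2) with whole-list operations: parents are [None] plus each node repeated twice (truncated to n), and children lists are the tail node_list[1:] chunked into consecutive pairs, padded with empty lists.
import Mathlib
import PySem

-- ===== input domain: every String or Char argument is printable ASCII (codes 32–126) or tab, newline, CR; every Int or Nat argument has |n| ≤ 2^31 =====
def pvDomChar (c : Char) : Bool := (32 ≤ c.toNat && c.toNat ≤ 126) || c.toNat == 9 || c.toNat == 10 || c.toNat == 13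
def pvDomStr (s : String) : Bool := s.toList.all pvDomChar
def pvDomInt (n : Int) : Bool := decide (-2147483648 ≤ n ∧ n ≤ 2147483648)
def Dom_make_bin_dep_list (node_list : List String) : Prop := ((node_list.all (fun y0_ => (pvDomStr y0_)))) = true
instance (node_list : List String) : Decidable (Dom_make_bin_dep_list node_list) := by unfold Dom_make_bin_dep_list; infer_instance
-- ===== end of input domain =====

-- B drops A's per-node index arithmetic: parents = [None] + each node doubled (truncated to n),
-- children = the tail chunked into consecutive pairs, padded with [].
-- ===== PORT A =====
-- Indexing node_list[k] is ported as getD k "" : every index A reads ((i-1)//2 for i ≥ 1,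
-- and child indices guarded by `< len`) is in range, so this is exact.
def make_bin_dep_list (node_list : List String) : List (Option String) × List (List String) :=
  (List.range node_list.length).foldl
    (fun (st : List (Option String) × List (List String)) i =>
      let parent_lists :=
        if i = 0 then st.1 ++ [none] else st.1 ++ [some (node_list.getD ((i - 1) / 2) "")]
      let children_list : List String := []
      let first_child_idx := i * 2 + 1
      let second_child_idx := i * 2 + 2
      let children_list :=
        if first_child_idx < node_list.length then
          children_list ++ [node_list.getD first_child_idx ""] else children_list
      let children_list :=
        if second_child_idx < node_list.length then
          children_list ++ [node_list.getD second_child_idx ""] else children_list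
      (parent_lists, st.2 ++ [children_list]))
    ([], [])

-- ===== PORT B =====
-- [None] + doubled is heterogeneous in Python; under the Option String type it is none :: map some.
-- The slice tail[k:k+2] for k ≥ 0 is (tail.drop k).take 2 (exact for nonnegative bounds);
-- range(0, L, 2) is List.range' 0 ((L+1)/2) 2 (exactly [0, 2, …], ⌈L/2⌉ elements).
def make_bin_dep_list_alt (node_list : List String) : List (Option String) × List (List String) :=
  let n := node_list.length
  let doubled := node_list.flatMap (fun v => [v, v])
  let parent_lists := (none :: doubled.map some).take n
  let tail := node_list.drop 1
  let children_lists :=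
    (List.range' 0 ((tail.length + 1) / 2) 2).map (fun k => (tail.drop k).take 2)
  (parent_lists, children_lists ++ List.replicate (n - children_lists.length) [])

-- ===== PRECONDITION & SPEC =====
def Spec_make_bin_dep_list (node_list : List String) (out : List (Option String) × List (List String)) : Prop := out = make_bin_dep_list_alt node_list
instance (node_list : List String) (out : List (Option String) × List (List String)) : Decidable (Spec_make_bin_dep_list node_list out) := by unfold Spec_make_bin_dep_list; infer_instance

-- ===== CLAIM (what is proved, stated in full; the proofs are below) =====
def Claim_equal_make_bin_dep_list : Prop := ∀ (node_list : List String), Dom_make_bin_dep_list node_list → Spec_make_bin_dep_list node_list (make_bin_dep_list node_list)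

-- ===== LEMMAS AND PROOFS =====

-- parent entry of index i in A's traversal
def pvPf (nl : List String) (i : Nat) : Option String :=
  if i = 0 then none else some (nl.getD ((i - 1) / 2) "")

-- children entry of index i in A's traversal
def pvCf (nl : List String) (i : Nat) : List String :=
  (if i * 2 + 1 < nl.length then [nl.getD (i * 2 + 1) ""] else []) ++
  (if i * 2 + 2 < nl.length then [nl.getD (i * 2 + 2) ""] else [])

-- A's fold accumulates both maps
lemma foldA_eq (nl : List String) (l : List Nat) (as : List (Option String)) (bs : List (List String)) :
    l.foldl
      (fun (st : List (Option String) × List (List String)) i =>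
        let parent_lists :=
          if i = 0 then st.1 ++ [none] else st.1 ++ [some (nl.getD ((i - 1) / 2) "")]
        let children_list : List String := []
        let first_child_idx := i * 2 + 1
        let second_child_idx := i * 2 + 2
        let children_list :=
          if first_child_idx < nl.length then
            children_list ++ [nl.getD first_child_idx ""] else children_list
        let children_list :=
          if second_child_idx < nl.length then
            children_list ++ [nl.getD second_child_idx ""] else children_list
        (parent_lists, st.2 ++ [children_list]))
      (as, bs)
    = (as ++ l.map (pvPf nl), bs ++ l.map (pvCf nl)) := by
  induction l generalizing as bs with
  | nil => simp
  | cons j t ih =>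
      simp only [List.foldl_cons, List.map_cons]
      rw [ih]
      simp only [pvPf, pvCf]
      by_cases hj : j = 0 <;> simp [hj, List.append_assoc] <;> split_ifs <;> simp

lemma make_bin_dep_list_eq (nl : List String) :
    make_bin_dep_list nl =
      ((List.range nl.length).map (pvPf nl), (List.range nl.length).map (pvCf nl)) := by
  unfold make_bin_dep_list
  simpa using foldA_eq nl (List.range nl.length) [] []

-- the doubled list read at position j is the node at j / 2
lemma doubled_getD (nl : List String) (j : Nat) (h : j < 2 * nl.length) :
    (nl.flatMap (fun v => [v, v])).getD j "" = nl.getD (j / 2) "" := by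
  induction nl generalizing j with
  | nil => simp at h
  | cons v t ih =>
      match j, h with
      | 0, _ => rfl
      | 1, _ => rfl
      | (j + 2), h =>
          have h' : j < 2 * t.length := by simp at h; omega
          have : (j + 2) / 2 = j / 2 + 1 := by omega
          simpa [this, List.getD] using ih j h'

lemma doubled_length (nl : List String) :
    (nl.flatMap (fun v => [v, v])).length = 2 * nl.length := by
  induction nl with
  | nil => rfl
  | cons v t ih => simp [ih]; omega

-- two consecutive elements of a drop, as A's guarded appends
lemma take2_drop (nl : List String) (k : Nat) :
    (nl.drop k).take 2 =
      (if k < nl.length then [nl.getD k ""] else []) ++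
      (if k + 1 < nl.length then [nl.getD (k + 1) ""] else []) := by
  induction nl generalizing k with
  | nil => simp
  | cons v t ih =>
      match k with
      | 0 =>
          match t with
          | [] => simp
          | w :: u => simp [List.getD]
      | (k + 1) =>
          simpa [List.getD, Nat.succ_lt_succ_iff] using ih k

-- ===== VERDICT (by name: the statement is the Claim_ definition above) =====
theorem make_bin_dep_list_spec : Claim_equal_make_bin_dep_list := by
  intro nl _
  unfold Spec_make_bin_dep_list
  rw [make_bin_dep_list_eq]
  unfold make_bin_dep_list_alt
  refine Prod.ext ?_ ?_
  · -- parents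
    apply List.ext_getElem
    · simp only [List.length_take, List.length_cons, List.length_map, List.length_range,
        doubled_length]
      omega
    · intro i h1 h2
      have hi : i < nl.length := by simpa using h1
      rw [List.getElem_take]
      match i with
      | 0 => simp [pvPf]
      | (i + 1) =>
          have hlen : i < (nl.flatMap (fun v => [v, v])).length := by
            rw [doubled_length]; omega
          simp only [List.getElem_cons_succ, List.getElem_map, List.getElem_map,
            List.getElem_range]
          rw [← List.getD_eq_getElem _ "" hlen, doubled_getD nl i (by omega)]
          simp [pvPf]
  · -- children
    apply List.ext_getElem
    · simp only [List.length_append, List.length_map, List.length_range', List.length_replicate,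
        List.length_range, List.length_drop]
      omega
    · intro p h1 h2
      have hp : p < nl.length := by simpa using h1
      simp only [List.getElem_map, List.getElem_range]
      by_cases hc : p < ((nl.drop 1).length + 1) / 2
      · rw [List.getElem_append_left (by simpa using hc)]
        simp only [List.getElem_map, List.getElem_range']
        rw [List.drop_drop, take2_drop]
        simp only [pvCf, show ∀ q : Nat, 1 + (0 + 2 * q) = q * 2 + 1 from fun q => by ring]
      · rw [List.getElem_append_right (by simpa using hc)]
        simp only [List.getElem_replicate]
        have hL : (nl.drop 1).length = nl.length - 1 := by simp
        have : ¬ p * 2 + 1 < nl.length := by omega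
        have h2' : ¬ p * 2 + 2 < nl.length := by omega
        simp [pvCf, this, h2']
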